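-- pv_equiv track=rewrite | github.com/Lynxens/advent_of_code_2024 | src/days/day7/__init__.py | can_produce_valid_equation
-- ===== SOURCE A (Python) =====
-- OPERATORS = {
--     '*': lambda a, b: a * b,
--     '+': lambda a, b: a + b,
--     '||': lambda a, b: a * pow(10, len(str(b))) + b,
-- }
--
-- def can_produce_valid_equation(a: int, rest: list[int], goal: int, operators: list[str]) -> bool:
--     if len(rest) == 0:
--         return a == goal
--
--     if a > goal:
--         return False
--
--     return any(
--         can_produce_valid_equation(OPERATORS[operator](a, rest[0]), rest[1:], goal, operators)
--         for operator in operators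
--     )
-- ===== SOURCE B (Python) =====
-- OPERATORS = {
--     '*': lambda a, b: a * b,
--     '+': lambda a, b: a + b,
--     '||': lambda a, b: a * pow(10, len(str(b))) + b,
-- }
--
-- def can_produce_valid_equation(a: int, rest: list[int], goal: int, operators: list[str]) -> bool:
--     # Iterative DFS over an explicit stack of (value, index, next-operator) states;
--     # no recursion, no slicing; rest is never mutated.
--     stack = [(a, 0, 0)]
--     while stack:
--         v, i, j = stack.pop()
--         if i == len(rest):
--             if v == goal:
--                 return True
--             continue
--         if v > goal:
--             continue
--         if j >= len(operators):
--             continue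
--         stack.append((v, i, j + 1))
--         stack.append((OPERATORS[operators[j]](v, rest[i]), i + 1, 0))
--     return False
-- ===== Notes on version B (the rewrite author's own statement) =====
-- stated objective: alternative
-- what changed: Replaced the recursive DFS (which re-slices rest at every call) by an iterative search over an explicit stack of (value, index, next-operator) states, popping one state per step with no recursion and no slicing; operator lookups happen in the same lazy order, so B is behaviorally identical to A everywhere, including exceptions.
-- outside the precondition, e.g. on can_produce_valid_equation(1, [2], 3, ['+', 'x']): A returns True, B returns True
import Mathlib
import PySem

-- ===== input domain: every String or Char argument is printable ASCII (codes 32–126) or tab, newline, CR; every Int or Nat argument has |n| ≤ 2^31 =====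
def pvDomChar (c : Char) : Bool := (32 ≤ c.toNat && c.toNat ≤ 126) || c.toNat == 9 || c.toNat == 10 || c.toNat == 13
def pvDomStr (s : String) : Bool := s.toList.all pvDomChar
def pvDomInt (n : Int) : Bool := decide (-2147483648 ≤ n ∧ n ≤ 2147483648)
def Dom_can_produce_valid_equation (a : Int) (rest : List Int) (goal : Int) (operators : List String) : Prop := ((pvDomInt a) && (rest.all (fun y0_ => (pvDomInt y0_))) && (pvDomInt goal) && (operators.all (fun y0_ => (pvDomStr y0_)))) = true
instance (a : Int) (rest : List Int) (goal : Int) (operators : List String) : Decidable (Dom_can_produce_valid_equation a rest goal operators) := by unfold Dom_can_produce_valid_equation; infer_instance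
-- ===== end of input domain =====

-- B replaces the recursive, slicing DFS by an iterative search over an explicit stack of
-- (value, index, next-operator) states; same return value everywhere (objective: alternative).

-- the module constant OPERATORS, shared by both ports (lookup of a key not in the
-- dict raises KeyError in Python; those inputs are outside Pre_, the default branch is unreachable there)
def pvOp (op : String) (x y : Int) : Int :=
  if op = "*" then x * y
  else if op = "+" then x + y
  else if op = "||" then x * 10 ^ (PySem.Str.len (PySem.Int.toStr y)).toNat + y
  else 0

-- ===== PORT A =====
def can_produce_valid_equation (a : Int) (rest : List Int) (goal : Int) (operators : List String) : Bool :=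
  match rest with
  | [] => a == goal
  | r :: rs =>
    if a > goal then false
    else operators.any (fun op => can_produce_valid_equation (pvOp op a r) rs goal operators)

-- ===== PORT B =====
-- termination measure for the stack loop (proof artefacts for the port's own recursion)
def pvTm (k : Nat) : Nat → Nat
  | 0 => 1
  | d + 1 => (k + 1) + k * pvTm k d

def pvMu (n k i j : Nat) : Nat :=
  if n ≤ i then 1 else max 1 ((k + 1 - j) + (k - j) * pvTm k (n - i - 1))

lemma pvMu_pos (n k i j : Nat) : 1 ≤ pvMu n k i j := by
  unfold pvMu; split
  · exact le_refl 1
  · exact Nat.le_max_left _ _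

lemma pvTm_pos (k d : Nat) : 1 ≤ pvTm k d := by
  cases d
  · simp [pvTm]
  · simp only [pvTm]
    omega

lemma pvMu_top (n k i : Nat) (h : i < n) : pvMu n k (i + 1) 0 = pvTm k (n - i - 1) := by
  unfold pvMu
  by_cases hn : n ≤ i + 1
  · have : n - i - 1 = 0 := by omega
    simp [hn, this, pvTm]
  · have h3 : n - (i + 1) - 1 = n - i - 2 := by omega
    have h2 : n - i - 1 = (n - i - 2) + 1 := by omega
    have ht := pvTm_pos k (n - i - 2)
    rw [if_neg hn, h3, h2]
    simp only [pvTm, Nat.sub_zero]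
    exact Nat.max_eq_right (by omega)

lemma pvMu_expand (n k i j : Nat) (h : i < n) (hj : j < k) :
    pvMu n k (i + 1) 0 + pvMu n k i (j + 1) < pvMu n k i j := by
  rw [pvMu_top n k i h]
  have ht := pvTm_pos k (n - i - 1)
  unfold pvMu
  have hn : ¬ n ≤ i := by omega
  simp only [if_neg hn]
  have e1 : (k - j) * pvTm k (n - i - 1)
      = (k - (j + 1)) * pvTm k (n - i - 1) + pvTm k (n - i - 1) := by
    have : k - j = (k - (j + 1)) + 1 := by omega
    rw [this]; ring
  have m1 : max 1 ((k + 1 - j) + (k - j) * pvTm k (n - i - 1))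
      = (k + 1 - j) + (k - j) * pvTm k (n - i - 1) := by
    apply Nat.max_eq_right; omega
  have m2 : max 1 ((k + 1 - (j + 1)) + (k - (j + 1)) * pvTm k (n - i - 1))
      = (k + 1 - (j + 1)) + (k - (j + 1)) * pvTm k (n - i - 1) := by
    apply Nat.max_eq_right; omega
  rw [m1, m2]
  omega

-- the stack loop of Source B: pop a (value, index, next-operator) state, test leaf, prune,
-- otherwise push the continuation and the child.  The `rest.length ≤ i` leaf test totalizes
-- Python's `i == len(rest)` (states with i > len(rest) are never pushed).
def pvLoop (rest : List Int) (goal : Int) (operators : List String) :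
    List (Int × Nat × Nat) → Bool
  | [] => false
  | (v, i, j) :: stk =>
    if rest.length ≤ i then
      if v == goal then true else pvLoop rest goal operators stk
    else if v > goal then pvLoop rest goal operators stk
    else if operators.length ≤ j then pvLoop rest goal operators stk
    else pvLoop rest goal operators
      ((pvOp (operators.getD j "") v (rest.getD i 0), i + 1, 0) :: (v, i, j + 1) :: stk)
termination_by stk => (stk.map (fun s => pvMu rest.length operators.length s.2.1 s.2.2)).sum
decreasing_by
  · simp only [List.map_cons, List.sum_cons]
    have := pvMu_pos rest.length operators.length i j
    omega
  · simp only [List.map_cons, List.sum_cons]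
    have := pvMu_pos rest.length operators.length i j
    omega
  · simp only [List.map_cons, List.sum_cons]
    have := pvMu_pos rest.length operators.length i j
    omega
  · simp only [List.map_cons, List.sum_cons]
    have h1 : i < rest.length := by omega
    have h2 : j < operators.length := by omega
    have := pvMu_expand rest.length operators.length i j h1 h2
    omega

def can_produce_valid_equation_alt (a : Int) (rest : List Int) (goal : Int) (operators : List String) : Bool :=
  pvLoop rest goal operators [(a, 0, 0)]

-- ===== PRECONDITION & SPEC =====
-- Pre_ excludes inputs carrying an operator key outside OPERATORS that the search could look
-- up: there Python's A (and B, which performs the same lookups in the same lazy order) raises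
-- KeyError — except when a lazily found solution returns True first, where both return that
-- same True; the exact raising set is not closed-form, so the whole region is excluded.
def Pre_can_produce_valid_equation (a : Int) (rest : List Int) (goal : Int) (operators : List String) : Prop :=
  rest = [] ∨ a > goal ∨ ∀ op ∈ operators, op = "*" ∨ op = "+" ∨ op = "||"
instance (a : Int) (rest : List Int) (goal : Int) (operators : List String) : Decidable (Pre_can_produce_valid_equation a rest goal operators) := by unfold Pre_can_produce_valid_equation; infer_instance

def pvWitness_can_produce_valid_equation : Int × List Int × Int × List String := (1, [2, 3], 7, ["*", "+"])

def Spec_can_produce_valid_equation (a : Int) (rest : List Int) (goal : Int) (operators : List String) (out : Bool) : Prop := out = can_produce_valid_equation_alt a rest goal operators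
instance (a : Int) (rest : List Int) (goal : Int) (operators : List String) (out : Bool) : Decidable (Spec_can_produce_valid_equation a rest goal operators out) := by unfold Spec_can_produce_valid_equation; infer_instance

-- ===== CLAIM (what is proved, stated in full; the proofs are below) =====
def Claim_equal_can_produce_valid_equation : Prop := ∀ (a : Int) (rest : List Int) (goal : Int) (operators : List String), Dom_can_produce_valid_equation a rest goal operators → Pre_can_produce_valid_equation a rest goal operators → Spec_can_produce_valid_equation a rest goal operators (can_produce_valid_equation a rest goal operators)

-- ===== LEMMAS AND PROOFS =====

-- denotation of a single stack state: what exploring it alone would return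
def pvG (rest : List Int) (goal : Int) (operators : List String) (s : Int × Nat × Nat) : Bool :=
  if rest.length ≤ s.2.1 then s.1 == goal
  else if s.1 > goal then false
  else (operators.drop s.2.2).any (fun op =>
    can_produce_valid_equation (pvOp op s.1 (rest.getD s.2.1 0)) (rest.drop (s.2.1 + 1)) goal operators)

lemma pvG_zero (rest : List Int) (goal : Int) (operators : List String) (v : Int) (i : Nat) :
    pvG rest goal operators (v, i, 0)
      = can_produce_valid_equation v (rest.drop i) goal operators := by
  unfold pvG
  by_cases h : rest.length ≤ i
  · rw [if_pos h, List.drop_eq_nil_of_le h]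
    simp [can_produce_valid_equation]
  · have h' : i < rest.length := by omega
    have hg : rest.getD i 0 = rest[i] := by
      simp [List.getD_eq_getElem?_getD, List.getElem?_eq_getElem h']
    rw [if_neg h, List.drop_eq_getElem_cons h', hg]
    simp only [can_produce_valid_equation, List.drop_zero]

lemma pvLoop_any (rest : List Int) (goal : Int) (operators : List String)
    (stk : List (Int × Nat × Nat)) :
    pvLoop rest goal operators stk = stk.any (pvG rest goal operators) := by
  induction stk using pvLoop.induct rest goal operators with
  | case1 => simp [pvLoop]
  | case2 v i j stk hle heq =>
    rw [pvLoop]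
    simp [hle, heq, pvG]
  | case3 v i j stk hle hne ih =>
    rw [pvLoop]
    simp only [if_pos hle, if_neg hne, ih, List.any_cons]
    have : pvG rest goal operators (v, i, j) = false := by simp [pvG, hle, hne]
    simp [this]
  | case4 v i j stk hle hgt ih =>
    rw [pvLoop]
    simp only [if_neg hle, if_pos hgt, ih, List.any_cons]
    have : pvG rest goal operators (v, i, j) = false := by simp [pvG, hle, hgt]
    simp [this]
  | case5 v i j stk hle hgt hj ih =>
    rw [pvLoop]
    simp only [if_neg hle, if_neg hgt, if_pos hj, ih, List.any_cons]
    have : pvG rest goal operators (v, i, j) = false := by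
      simp [pvG, hle, hgt, List.drop_eq_nil_of_le hj]
    simp [this]
  | case6 v i j stk hle hgt hj ih =>
    rw [pvLoop]
    simp only [if_neg hle, if_neg hgt, if_neg hj, ih, List.any_cons]
    have hj' : j < operators.length := by omega
    have hdrop : operators.drop j = operators[j] :: operators.drop (j + 1) :=
      List.drop_eq_getElem_cons hj'
    have hgetD : operators.getD j "" = operators[j] := by
      simp [List.getD_eq_getElem?_getD, List.getElem?_eq_getElem hj']
    have hGj : pvG rest goal operators (v, i, j)
        = (can_produce_valid_equation
            (pvOp operators[j] v (rest.getD i 0)) (rest.drop (i + 1)) goal operators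
          || pvG rest goal operators (v, i, j + 1)) := by
      unfold pvG
      simp only [if_neg hle, if_neg hgt]
      rw [hdrop, List.any_cons]
    rw [hGj, pvG_zero, hgetD]
    simp only [Bool.or_assoc]

-- ===== VERDICT (by name: the statement is the Claim_ definition above) =====
theorem can_produce_valid_equation_spec : Claim_equal_can_produce_valid_equation := by
  intro a rest goal operators _ _
  unfold Spec_can_produce_valid_equation can_produce_valid_equation_alt
  rw [pvLoop_any]
  simp only [List.any_cons, List.any_nil, Bool.or_false, pvG_zero, List.drop_zero]
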